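-- pv_equiv track=rewrite | github.com/anntsai5168/kg_anntsai5168_2021 | main.py | isOneToOne
-- ===== SOURCE A (Python) =====
-- def isOneToOne(str1, str2):
--
--     hmap = {} # store the mapping relationship between str1 and str2
--
--     i, j = 0, 0
--     while i < len(str1) and j < len(str2):
--         cur = hmap.get(str1[i], 0)
--         # not yet exist in hmap
--         if cur == 0:
--             hmap[str1[i]] = str2[j]
--         # not one-to-one
--         elif str2[j] != cur:
--             return False
--         i += 1
--         j += 1
--
--     return True
-- ===== SOURCE B (Python) =====
-- def isOneToOne(str1, str2):
--     ps = list(zip(str1, str2))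
--     return len(set(ps)) == len({a for a, _ in ps})
-- ===== Notes on version B (the rewrite author's own statement) =====
-- stated objective: simpler
-- what changed: A's indexed while-loop that grows a char-to-char dict and early-returns on the first conflict is replaced by a single cardinality comparison: the number of distinct (src,dst) pairs in zip(str1,str2) equals the number of distinct source chars iff the mapping is consistent.
import Mathlib
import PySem

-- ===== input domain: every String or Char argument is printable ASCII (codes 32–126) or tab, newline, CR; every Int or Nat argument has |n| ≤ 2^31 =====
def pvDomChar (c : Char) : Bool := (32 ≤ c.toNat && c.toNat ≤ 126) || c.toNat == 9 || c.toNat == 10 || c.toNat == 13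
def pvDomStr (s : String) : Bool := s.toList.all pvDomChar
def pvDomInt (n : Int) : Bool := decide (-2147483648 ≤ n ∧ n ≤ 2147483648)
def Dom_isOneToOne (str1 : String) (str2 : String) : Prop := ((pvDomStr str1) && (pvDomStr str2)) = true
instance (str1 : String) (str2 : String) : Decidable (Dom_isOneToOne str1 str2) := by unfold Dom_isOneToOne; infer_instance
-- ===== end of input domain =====

-- B replaces A's indexed while-loop over a mutable dict (with early return) by a single
-- cardinality comparison: #distinct (src,dst) pairs = #distinct src chars; objective: simpler.

-- ===== PORT A =====
-- The while loop advances i and j in lockstep from 0, so it is ported as structural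
-- recursion on the two character lists (exact: str1[i]/str2[j] are always in range here).
-- Python's `hmap.get(str1[i], 0)` uses the sentinel 0, which can never collide with a
-- stored value (values are 1-char strings), so `cur == 0` is exactly `Dict.get? = none`.
def isOneToOneLoop (s1 s2 : List Char) (hmap : PySem.Dict Char Char) : Bool :=
  match s1, s2 with
  | c1 :: t1, c2 :: t2 =>
    match hmap.get? c1 with
    | none => isOneToOneLoop t1 t2 (hmap.insert c1 c2)
    | some cur => if c2 ≠ cur then false else isOneToOneLoop t1 t2 hmap
  | _, _ => true

def isOneToOne (str1 : String) (str2 : String) : Bool :=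
  isOneToOneLoop str1.toList str2.toList PySem.Dict.empty

-- ===== PORT B =====
-- Source B: ps = list(zip(str1, str2)); return len(set(ps)) == len({a for a, _ in ps})
def isOneToOne_alt (str1 : String) (str2 : String) : Bool :=
  let ps := List.zip str1.toList str2.toList
  PySem.Set.len (PySem.Set.ofList ps) == PySem.Set.len (PySem.Set.ofList (ps.map Prod.fst))

-- ===== PRECONDITION & SPEC =====
def Spec_isOneToOne (str1 : String) (str2 : String) (out : Bool) : Prop := out = isOneToOne_alt str1 str2
instance (str1 : String) (str2 : String) (out : Bool) : Decidable (Spec_isOneToOne str1 str2 out) := by unfold Spec_isOneToOne; infer_instance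

-- ===== CLAIM (what is proved, stated in full; the proofs are below) =====
def Claim_equal_isOneToOne : Prop := ∀ (str1 : String) (str2 : String), Dom_isOneToOne str1 str2 → Spec_isOneToOne str1 str2 (isOneToOne str1 str2)

-- ===== LEMMAS AND PROOFS =====

-- "every zipped pair agrees with the dict-so-far, falling back to the first
-- occurrence in the pair list" — the invariant characterising A's loop.
def Cond (h : PySem.Dict Char Char) (p : List (Char × Char)) : Prop :=
  ∀ ab ∈ p, ((h.get? ab.1).or (p.lookup ab.1)) = some ab.2

theorem cond_nil (h : PySem.Dict Char Char) : Cond h [] := by simp [Cond]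

theorem cond_cons_none {h : PySem.Dict Char Char} {a b : Char} {q : List (Char × Char)}
    (hg : h.get? a = none) : Cond h ((a, b) :: q) ↔ Cond (h.insert a b) q := by
  constructor
  · intro H ab hab
    by_cases hea : ab.1 = a
    · have := H ab (List.mem_cons_of_mem _ hab)
      simp [hea, hg, List.lookup] at this
      simp [hea, this]
    · have := H ab (List.mem_cons_of_mem _ hab)
      rw [List.lookup] at this
      simp only [show (ab.1 == a) = false by simp [hea]] at this
      simpa [PySem.Dict.get?_insert, hea] using this
  · intro H ab hab
    rcases List.mem_cons.mp hab with h1 | h1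
    · subst h1; simp [hg, List.lookup]
    · by_cases hea : ab.1 = a
      · have := H ab h1
        simp [hea] at this
        simp [hea, hg, List.lookup, this]
      · have := H ab h1
        simp only [PySem.Dict.get?_insert, if_neg hea] at this
        rw [List.lookup]
        simp only [show (ab.1 == a) = false by simp [hea]]
        exact this

theorem cond_cons_some {h : PySem.Dict Char Char} {a b c : Char} {q : List (Char × Char)}
    (hg : h.get? a = some c) : Cond h ((a, b) :: q) ↔ (b = c ∧ Cond h q) := by
  constructor
  · intro H
    refine ⟨by have := H (a, b) (by simp); simpa [hg] using this.symm, ?_⟩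
    intro ab hab
    have := H ab (List.mem_cons_of_mem _ hab)
    by_cases hea : ab.1 = a
    · simp [hea, hg] at this ⊢
      exact this
    · rw [List.lookup] at this
      simp only [show (ab.1 == a) = false by simp [hea]] at this
      exact this
  · rintro ⟨hb, H⟩ ab hab
    rcases List.mem_cons.mp hab with h1 | h1
    · subst h1; simp [hg, hb]
    · by_cases hea : ab.1 = a
      · have := H ab h1
        simp [hea, hg] at this ⊢
        exact this
      · have := H ab h1
        rw [List.lookup]
        simp only [show (ab.1 == a) = false by simp [hea]]
        exact this

theorem isOneToOneLoop_iff (s1 s2 : List Char) (h : PySem.Dict Char Char) :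
    isOneToOneLoop s1 s2 h = true ↔ Cond h (List.zip s1 s2) := by
  induction s1 generalizing s2 h with
  | nil => simp [isOneToOneLoop, cond_nil]
  | cons a t1 ih =>
    cases s2 with
    | nil => simp [isOneToOneLoop, cond_nil]
    | cons b t2 =>
      rw [List.zip_cons_cons, isOneToOneLoop]
      rcases hg : h.get? a with _ | c
      · rw [cond_cons_none hg, ih]
      · rw [cond_cons_some hg]
        by_cases hbc : b = c
        · simp [hbc, ih]
        · simp [hbc]

theorem lookup_exists {p : List (Char × Char)} {a b : Char} (h : (a, b) ∈ p) :
    ∃ b', p.lookup a = some b' ∧ (a, b') ∈ p := by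
  induction p with
  | nil => simp at h
  | cons x t ih =>
    by_cases hx : x.1 = a
    · refine ⟨x.2, ?_, ?_⟩
      · rw [List.lookup]
        simp [hx]
      · have : (a, x.2) = x := by rw [← hx]
        rw [this]; exact List.mem_cons_self
    · rcases List.mem_cons.mp h with h1 | h1
      · exact absurd (congrArg Prod.fst h1).symm hx
      · rcases ih h1 with ⟨b', h1, h2⟩
        refine ⟨b', ?_, .tail _ h2⟩
        rw [List.lookup, show (a == x.1) = false by simp [Ne.symm hx]]
        exact h1

theorem setLen_eq_card (m : List (Char × Char)) :
    (PySem.Set.ofList m).length = m.toFinset.card := by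
  have h1 : (PySem.Set.ofList m).toFinset = m.toFinset := by
    ext x; simp [PySem.Set.mem_ofList]
  rw [← h1, List.toFinset_card_of_nodup (PySem.Set.nodup_ofList m)]

theorem setLen_eq_card' (m : List Char) :
    (PySem.Set.ofList m).length = m.toFinset.card := by
  have h1 : (PySem.Set.ofList m).toFinset = m.toFinset := by
    ext x; simp [PySem.Set.mem_ofList]
  rw [← h1, List.toFinset_card_of_nodup (PySem.Set.nodup_ofList m)]

theorem card_iff_lookup (p : List (Char × Char)) :
    ((PySem.Set.ofList p).length = (PySem.Set.ofList (p.map Prod.fst)).length) ↔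
      Cond PySem.Dict.empty p := by
  have hmap : (p.map Prod.fst).toFinset = p.toFinset.image Prod.fst := by
    ext x; simp
  rw [setLen_eq_card, setLen_eq_card', hmap]
  have hcond : Cond PySem.Dict.empty p ↔ ∀ ab ∈ p, p.lookup ab.1 = some ab.2 := by
    unfold Cond
    simp [PySem.Dict.get?_empty]
  rw [hcond]
  constructor
  · intro hcard ab hab
    have hinj : Set.InjOn Prod.fst (↑p.toFinset : Set (Char × Char)) :=
      Finset.card_image_iff.mp hcard.symm
    rcases lookup_exists hab with ⟨b', h1, h2⟩
    have : (ab.1, b') = ab :=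
      hinj (show (ab.1, b') ∈ (↑p.toFinset : Set (Char × Char)) by simpa using h2)
        (show ab ∈ (↑p.toFinset : Set (Char × Char)) by simpa using hab) rfl
    rw [h1, ← this]
  · intro H
    refine (Finset.card_image_iff.mpr ?_).symm
    intro x hx y hy hxy
    have hx' : x ∈ p := by simpa using hx
    have hy' : y ∈ p := by simpa using hy
    have e1 : p.lookup x.1 = some x.2 := H x hx'
    have e2 : p.lookup y.1 = some y.2 := H y hy'
    rw [hxy] at e1
    rw [e1] at e2
    exact Prod.ext hxy (Option.some.inj e2)

-- ===== VERDICT (by name: the statement is the Claim_ definition above) =====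
theorem isOneToOne_spec : Claim_equal_isOneToOne := by
  intro str1 str2 _
  unfold Spec_isOneToOne isOneToOne isOneToOne_alt
  rw [Bool.eq_iff_iff, isOneToOneLoop_iff]
  simp only [beq_iff_eq, PySem.Set.len, Nat.cast_inj]
  exact (card_iff_lookup _).symm
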